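-- pv_equiv track=rewrite | github.com/kmax-tech/arg-axioms | analysis/utils/latex_helper.py | fill_rows
-- ===== SOURCE A (Python) =====
-- def fill_rows(text_list):
--     ''''Works on specified input table'''
--
--     nbr_columns = len(text_list[0])
--     cols_entries = [[] for x in range(nbr_columns)]
--     for row in text_list:
--         assert len(row) == nbr_columns
--         for ind,entry in enumerate(row):
--             cols_entries[ind].append(len(entry))
--     cols_entries_max = [max(x) for x in cols_entries]
--
--     for row in text_list:
--         for ind,entry in enumerate(row):
--             spaces_to_add = cols_entries_max[ind] - len(entry)
--             if spaces_to_add > 0: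
--                 entry += " " * spaces_to_add
--             row[ind] = entry
--     return text_list
-- ===== SOURCE B (Python) =====
-- def fill_rows(text_list):
--     '''Works on specified input table'''
--     nbr_columns = len(text_list[0])
--     widths = [0] * nbr_columns
--     done = 0
--     for row in text_list:
--         assert len(row) == nbr_columns
--         for j, entry in enumerate(row):
--             if widths[j] < len(entry):
--                 # this column just grew: retroactively widen the rows already padded
--                 widths[j] = len(entry)
--                 for i in range(done):
--                     prev = text_list[i]
--                     prev[j] = prev[j] + " " * (widths[j] - len(prev[j]))
--         row[:] = [e + " " * (widths[j] - len(e)) for j, e in enumerate(row)]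
--         done += 1
--     return text_list
-- ===== Notes on version B (the rewrite author's own statement) =====
-- stated objective: alternative
-- what changed: B makes a single left-to-right pass that maintains running per-column widths and pads each row as it is reached, retroactively appending spaces to already-padded rows whenever a later cell widens a column, instead of A's two staged passes (collect every entry length per column, take the maxes, then pad everything).
import Mathlib
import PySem

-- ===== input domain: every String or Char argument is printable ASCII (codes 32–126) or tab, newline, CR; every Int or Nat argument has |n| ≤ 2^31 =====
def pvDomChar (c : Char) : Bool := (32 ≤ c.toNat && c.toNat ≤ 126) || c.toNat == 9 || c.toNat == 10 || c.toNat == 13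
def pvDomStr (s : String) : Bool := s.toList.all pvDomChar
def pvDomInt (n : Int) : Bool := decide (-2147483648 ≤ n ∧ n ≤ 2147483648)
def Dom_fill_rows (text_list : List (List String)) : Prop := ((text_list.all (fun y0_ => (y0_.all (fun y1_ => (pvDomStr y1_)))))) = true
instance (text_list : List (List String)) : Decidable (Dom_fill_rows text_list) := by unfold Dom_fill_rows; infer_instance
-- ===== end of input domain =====

-- B replaces A's two staged passes (collect every entry length per column, max them, then pad everything)
-- with ONE left-to-right pass that keeps running per-column widths and pads each row as it is reached,
-- retroactively appending spaces to the already-padded rows whenever a later cell widens a column.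
-- Both Pythons mutate the row lists in place identically and return the mutated object; the theorems are
-- about the returned table.

-- ===== PORT A =====
-- Python's max() on a list of ints (the empty case, where Python raises, is unreachable inside Pre_)
def pyMaxNat (l : List Nat) : Nat := match l with | [] => 0 | h :: t => t.foldl max h

def fill_rows (text_list : List (List String)) : List (List String) :=
  let nbr_columns := (text_list.headD []).length
  let cols_entries : List (List Nat) := List.replicate nbr_columns []
  let cols_entries := text_list.foldl (fun acc row =>
    (PySem.List.enumerate row).foldl (fun a p =>
      a.set p.1.toNat (a.getD p.1.toNat [] ++ [p.2.toList.length])) acc) cols_entries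
  let cols_entries_max := cols_entries.map pyMaxNat
  text_list.map (fun row =>
    (PySem.List.enumerate row).foldl (fun r p =>
      let spaces_to_add : Int := (cols_entries_max.getD p.1.toNat 0 : Int) - (p.2.toList.length : Int)
      let entry := if 0 < spaces_to_add
        then String.ofList (p.2.toList ++ List.replicate spaces_to_add.toNat ' ')
        else p.2
      r.set p.1.toNat entry) row)

-- ===== PORT B =====
-- body of B's `if widths[j] < len(entry)` loop: grow widths[j] and re-pad every already-done row at column j
def growStep (st : List Nat × List (List String)) (p : Int × String) : List Nat × List (List String) :=
  let j := p.1.toNat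
  if st.1.getD j 0 < p.2.toList.length then
    let widths' := st.1.set j p.2.toList.length
    (widths', st.2.map (fun prev =>
      prev.set j (String.ofList ((prev.getD j "").toList ++
        List.replicate (widths'.getD j 0 - (prev.getD j "").toList.length) ' '))))
  else st

def fill_rows_alt (text_list : List (List String)) : List (List String) :=
  let nbr_columns := (text_list.headD []).length
  (text_list.foldl (fun st row =>
      let st2 := (PySem.List.enumerate row).foldl growStep st
      (st2.1, st2.2 ++ [(PySem.List.enumerate row).map (fun p =>
          String.ofList (p.2.toList ++ List.replicate (st2.1.getD p.1.toNat 0 - p.2.toList.length) ' '))])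
    ) (List.replicate nbr_columns 0, [])).2

-- ===== PRECONDITION & SPEC =====
-- A raises IndexError on the empty table (indexing its first row) and AssertionError on ragged tables; B raises in exactly the same way.
def Pre_fill_rows (text_list : List (List String)) : Prop :=
  text_list ≠ [] ∧ ∀ row ∈ text_list, row.length = (text_list.headD []).length
instance (text_list : List (List String)) : Decidable (Pre_fill_rows text_list) := by unfold Pre_fill_rows; infer_instance

def pvWitness_fill_rows : List (List String) := [["a", "bb"], ["ccc", "d"]]

def Spec_fill_rows (text_list : List (List String)) (out : List (List String)) : Prop := out = fill_rows_alt text_list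
instance (text_list : List (List String)) (out : List (List String)) : Decidable (Spec_fill_rows text_list out) := by unfold Spec_fill_rows; infer_instance

-- ===== CLAIM (what is proved, stated in full; the proofs are below) =====
def Claim_equal_fill_rows : Prop := ∀ (text_list : List (List String)), Dom_fill_rows text_list → Pre_fill_rows text_list → Spec_fill_rows text_list (fill_rows text_list)

-- ===== LEMMAS AND PROOFS =====

-- common vocabulary of the proof
def padStr (s : String) (w : Nat) : String :=
  String.ofList (s.toList ++ List.replicate (w - s.toList.length) ' ')

def padRow (ws : List Nat) (k : Nat) : List String → List String
  | [] => []
  | e :: es => padStr e (ws.getD k 0) :: padRow ws (k + 1) es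

def wcol (rows : List (List String)) (j : Nat) : Nat :=
  rows.foldl (fun m r => max m (r.getD j "").toList.length) 0

def widthsOf (rows : List (List String)) (n : Nat) : List Nat := (List.range n).map (wcol rows)

-- the running widths B maintains: ws maxed, from column k on, with the lengths of the row's entries
def updW : List Nat → Nat → List String → List Nat
  | ws, _, [] => ws
  | ws, k, e :: es =>
      updW (if ws.getD k 0 < e.toList.length then ws.set k e.toList.length else ws) (k + 1) es

theorem set_append_len {α : Type} (pre : List α) (x v : α) (xs : List α) :
    (pre ++ x :: xs).set pre.length v = pre ++ v :: xs := by
  induction pre with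
  | nil => simp
  | cons p ps ih => simp [ih]

theorem getD_append_len {α : Type} (pre : List α) (a : α) (as : List α) (d : α) :
    (pre ++ a :: as).getD pre.length d = a := by
  simp [List.getD]

-- ============ A-side characterisation ============

-- A's inner width loop over one row appends that row's entry lengths columnwise
theorem foldA_row (row : List String) : ∀ (pre acc : List (List Nat)), row.length = acc.length →
    (PySem.List.enumerate row (pre.length : Int)).foldl (fun a p =>
      a.set p.1.toNat (a.getD p.1.toNat [] ++ [p.2.toList.length])) (pre ++ acc)
    = pre ++ List.zipWith (fun a (e : String) => a ++ [e.toList.length]) acc row := by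
  induction row with
  | nil => intro pre acc h; simp [PySem.List.enumerate_nil, (List.length_eq_zero_iff.mp h.symm)]
  | cons x xs ih =>
    intro pre acc h
    match acc with
    | [] => simp at h
    | a :: as =>
      rw [PySem.List.enumerate_cons]
      simp only [List.foldl_cons, List.zipWith_cons_cons, Int.toNat_natCast]
      rw [getD_append_len, set_append_len]
      have hcast : ((pre.length : Int) + 1) = (((pre ++ [a ++ [x.toList.length]]).length : Nat) : Int) := by
        simp
      rw [hcast]
      rw [show pre ++ (a ++ [x.toList.length]) :: as = (pre ++ [a ++ [x.toList.length]]) ++ as by simp]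
      rw [ih (pre ++ [a ++ [x.toList.length]]) as (by simpa using h)]
      simp

-- the per-column lists of entry lengths of the first n columns (what A's width loop maintains)
def colsLen (rows : List (List String)) (n : Nat) : List (List Nat) :=
  (List.range n).map (fun i => rows.map (fun r => (r.getD i "").toList.length))

theorem colsLen_step (done : List (List String)) (row : List String) (n : Nat) (h : row.length = n) :
    List.zipWith (fun a (e : String) => a ++ [e.toList.length]) (colsLen done n) row
    = colsLen (done ++ [row]) n := by
  apply List.ext_getElem
  · simp [colsLen, h]
  · intro i h1 h2
    simp only [colsLen, List.getElem_zipWith, List.getElem_map, List.getElem_range] at *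
    have hi : i < n := by simpa [colsLen, h] using h2
    simp [List.getD, List.getElem?_eq_getElem (by omega : i < row.length)]

-- A's whole width loop computes colsLen
theorem foldA_cols (n : Nat) : ∀ (rows done : List (List String)), (∀ row ∈ rows, row.length = n) →
    rows.foldl (fun acc row =>
      (PySem.List.enumerate row).foldl (fun a p =>
        a.set p.1.toNat (a.getD p.1.toNat [] ++ [p.2.toList.length])) acc) (colsLen done n)
    = colsLen (done ++ rows) n := by
  intro rows
  induction rows with
  | nil => intro done h; simp
  | cons r rs ih =>
    intro done h
    simp only [List.foldl_cons]
    have hlen : (colsLen done n).length = n := by simp [colsLen]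
    have h1 := foldA_row r ([] : List (List Nat)) (colsLen done n) (by rw [hlen]; exact h r (by simp))
    simp only [List.nil_append, List.length_nil, Nat.cast_zero] at h1
    rw [show PySem.List.enumerate r = PySem.List.enumerate r 0 from rfl, h1,
        colsLen_step done r n (h r (by simp)), ih (done ++ [r]) (fun row hr => h row (by simp [hr]))]
    simp

-- A's padding loop over one row is a map over its enumeration
theorem foldA_pad (f : Nat → String → String) (row : List String) : ∀ (pre : List String),
    (PySem.List.enumerate row (pre.length : Int)).foldl (fun r p => r.set p.1.toNat (f p.1.toNat p.2)) (pre ++ row)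
    = pre ++ (PySem.List.enumerate row (pre.length : Int)).map (fun p => f p.1.toNat p.2) := by
  induction row with
  | nil => intro pre; simp [PySem.List.enumerate_nil]
  | cons x xs ih =>
    intro pre
    rw [PySem.List.enumerate_cons]
    simp only [List.foldl_cons, List.map_cons, Int.toNat_natCast]
    rw [set_append_len]
    have hcast : ((pre.length : Int) + 1) = (((pre ++ [f pre.length x]).length : Nat) : Int) := by
      simp
    rw [hcast]
    rw [show pre ++ f pre.length x :: xs = (pre ++ [f pre.length x]) ++ xs by simp]
    rw [ih (pre ++ [f pre.length x])]
    simp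

-- A's manual space arithmetic (pad only when spaces_to_add > 0) is padStr
theorem padA_eq_padStr (w : Nat) (e : String) :
    (if 0 < ((w : Int) - (e.toList.length : Int))
      then String.ofList (e.toList ++ List.replicate ((w : Int) - (e.toList.length : Int)).toNat ' ')
      else e) = padStr e w := by
  simp only [padStr]
  by_cases h : e.toList.length < w
  · rw [if_pos (by omega)]
    have : (((w : Int) - (e.toList.length : Int))).toNat = w - e.toList.length := by omega
    rw [this]
  · rw [if_neg (by omega)]
    have h0 : w - e.toList.length = 0 := by omega
    rw [h0, List.replicate_zero, List.append_nil, String.ofList_toList]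

-- an enumerate-map of pads is padRow
theorem map_enumerate_pad (ws : List Nat) : ∀ (es : List String) (k : Nat),
    (PySem.List.enumerate es (k : Int)).map (fun p => padStr p.2 (ws.getD p.1.toNat 0))
    = padRow ws k es := by
  intro es
  induction es with
  | nil => intro k; simp [PySem.List.enumerate_nil, padRow]
  | cons e es ih =>
    intro k
    rw [PySem.List.enumerate_cons, List.map_cons]
    have hc : ((k : Int) + 1) = (((k + 1 : Nat)) : Int) := by push_cast; ring
    rw [hc, ih (k + 1)]
    simp [padRow]

-- ============ B-side characterisation ============

theorem padStr_toList (s : String) (w : Nat) :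
    (padStr s w).toList = s.toList ++ List.replicate (w - s.toList.length) ' ' := by
  rw [padStr, String.toList_ofList]

theorem padStr_length (s : String) (w : Nat) (h : s.toList.length ≤ w) :
    (padStr s w).toList.length = w := by
  rw [padStr_toList, List.length_append, List.length_replicate]; omega

-- extending an already-padded cell by the width difference re-pads it to the new width
theorem padStr_extend (s : String) (w w' : Nat) (hs : s.toList.length ≤ w) (hw : w ≤ w') :
    String.ofList ((padStr s w).toList ++ List.replicate (w' - (padStr s w).toList.length) ' ')
    = padStr s w' := by
  rw [padStr_length s w hs, padStr_toList, padStr, List.append_assoc, ← List.replicate_add]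
  have h2 : w - s.toList.length + (w' - w) = w' - s.toList.length := by omega
  rw [h2]

theorem getD_padRow (ws : List Nat) : ∀ (es : List String) (k j : Nat),
    (padRow ws k es).getD j "" = if h : j < es.length then padStr es[j] (ws.getD (k + j) 0) else "" := by
  intro es
  induction es with
  | nil => intro k j; simp [padRow]
  | cons e es ih =>
    intro k j
    match j with
    | 0 => simp [padRow]
    | j + 1 =>
      simp only [padRow, List.getD_cons_succ, ih (k + 1) j, List.length_cons]
      by_cases h : j < es.length
      · rw [dif_pos h, dif_pos (by omega)]
        have : k + 1 + j = k + (j + 1) := by omega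
        rw [this]
        simp
      · rw [dif_neg h, dif_neg (by omega)]

theorem padRow_length (ws : List Nat) : ∀ (es : List String) (k : Nat), (padRow ws k es).length = es.length := by
  intro es; induction es with
  | nil => intro k; simp [padRow]
  | cons e es ih => intro k; simp [padRow, ih]

theorem getD_set_self {l : List Nat} {k : Nat} {v : Nat} (h : k < l.length) :
    (l.set k v).getD k 0 = v := by
  simp [List.getD, h]

theorem getD_set_ne {l : List Nat} {k j : Nat} {v : Nat} (h : k ≠ j) :
    (l.set k v).getD j 0 = l.getD j 0 := by
  simp [List.getD, List.getElem?_set_ne h]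

-- one growth step re-pads a previously padded row to the new widths
theorem grow_prev (r : List String) (ws : List Nat) (k : Nat) (v : Nat)
    (hk : k < ws.length)
    (hb : (r.getD k "").toList.length ≤ ws.getD k 0) (hv : ws.getD k 0 ≤ v) :
    (padRow ws 0 r).set k (String.ofList (((padRow ws 0 r).getD k "").toList ++
      List.replicate ((ws.set k v).getD k 0 - ((padRow ws 0 r).getD k "").toList.length) ' '))
    = padRow (ws.set k v) 0 r := by
  rw [getD_set_self hk, getD_padRow]
  by_cases h : k < r.length
  · rw [dif_pos h]
    simp only [Nat.zero_add]
    have hb' : (r[k]).toList.length ≤ ws.getD k 0 := by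
      rwa [List.getD_eq_getElem r "" h] at hb
    rw [padStr_extend _ _ _ hb' hv]
    apply List.ext_getElem
    · simp [padRow_length]
    · intro i h1 h2
      have hi : i < r.length := by
        have := padRow_length (ws.set k v) r 0; omega
      have hA : i < (padRow ws 0 r).length := by rw [padRow_length]; exact hi
      rw [List.getElem_set, ← List.getD_eq_getElem _ "" h2, getD_padRow, dif_pos hi, Nat.zero_add]
      by_cases hik : k = i
      · subst hik
        rw [if_pos rfl, getD_set_self hk]
      · rw [if_neg hik, getD_set_ne hik, ← List.getD_eq_getElem _ "" hA, getD_padRow, dif_pos hi,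
            Nat.zero_add]
  · -- k beyond the row: the set is a no-op and the widths change is invisible
    rw [dif_neg h]
    rw [List.set_eq_of_length_le (by rw [padRow_length]; omega)]
    apply List.ext_getElem
    · simp [padRow_length]
    · intro i h1 h2
      have hi : i < r.length := by
        have := padRow_length ws r 0; omega
      rw [← List.getD_eq_getElem _ "" h1, ← List.getD_eq_getElem _ "" h2,
          getD_padRow, getD_padRow, dif_pos hi, dif_pos hi]
      simp only [Nat.zero_add]
      rw [getD_set_ne (by omega : k ≠ i)]

-- B's inner (growth) fold, started from a consistent state, updates the widths with updW and re-pads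
theorem innerB : ∀ (es : List String) (k : Nat) (ws : List Nat) (pres : List (List String)),
    k + es.length ≤ ws.length →
    (∀ r ∈ pres, ∀ j, k ≤ j → (r.getD j "").toList.length ≤ ws.getD j 0) →
    (PySem.List.enumerate es (k : Int)).foldl growStep (ws, pres.map (fun r => padRow ws 0 r))
    = (updW ws k es, pres.map (fun r => padRow (updW ws k es) 0 r)) := by
  intro es
  induction es with
  | nil => intro k ws pres _ _; simp [PySem.List.enumerate_nil, updW]
  | cons e es ih =>
    intro k ws pres hlen hb
    rw [PySem.List.enumerate_cons]
    simp only [List.foldl_cons, List.length_cons] at hlen ⊢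
    have hcast : ((k : Int) + 1) = (((k + 1 : Nat)) : Int) := by push_cast; ring
    rw [hcast]
    by_cases h : ws.getD k 0 < e.toList.length
    · have hstep : growStep (ws, pres.map (fun r => padRow ws 0 r)) ((k : Int), e)
          = (ws.set k e.toList.length, pres.map (fun r => padRow (ws.set k e.toList.length) 0 r)) := by
        simp only [growStep, Int.toNat_natCast]
        rw [if_pos h]
        simp only [List.map_map]
        refine congrArg _ ?_
        apply List.map_congr_left
        intro r hr
        exact grow_prev r ws k e.toList.length (by omega)
          (hb r hr k (le_refl k)) (le_of_lt h)
      rw [hstep]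
      rw [ih (k + 1) (ws.set k e.toList.length) pres
        (by simp only [List.length_set]; omega)
        (fun r hr j hj => by rw [getD_set_ne (by omega)]; exact hb r hr j (by omega))]
      simp only [updW, if_pos h]
    · have hstep : growStep (ws, pres.map (fun r => padRow ws 0 r)) ((k : Int), e)
          = (ws, pres.map (fun r => padRow ws 0 r)) := by
        simp only [growStep, Int.toNat_natCast]
        rw [if_neg h]
      rw [hstep]
      rw [ih (k + 1) ws pres (by omega)
        (fun r hr j hj => hb r hr j (by omega))]
      simp only [updW, if_neg h]

theorem updW_length : ∀ (es : List String) (ws : List Nat) (k : Nat),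
    (updW ws k es).length = ws.length := by
  intro es
  induction es with
  | nil => intro ws k; simp [updW]
  | cons e es ih => intro ws k; simp only [updW]; rw [ih]; split <;> simp

theorem updW_getD : ∀ (es : List String) (ws : List Nat) (k j : Nat), k + es.length ≤ ws.length →
    (updW ws k es).getD j 0
    = if k ≤ j ∧ j < k + es.length
        then max (ws.getD j 0) ((es.getD (j - k) "").toList.length)
        else ws.getD j 0 := by
  intro es
  induction es with
  | nil => intro ws k j _; simp [updW]
  | cons e es ih =>
    intro ws k j hlen
    simp only [List.length_cons] at hlen ⊢
    simp only [updW]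
    set ws1 := if ws.getD k 0 < e.toList.length then ws.set k e.toList.length else ws with hws1
    have hlen1 : ws1.length = ws.length := by rw [hws1]; split <;> simp
    rw [ih ws1 (k + 1) j (by omega)]
    by_cases hjk : j = k
    · subst hjk
      rw [if_neg (by omega), if_pos (by omega)]
      have hgd : ws1.getD j 0 = max (ws.getD j 0) (e.toList.length) := by
        rw [hws1]; split
        · rw [getD_set_self (by omega)]; omega
        · omega
      rw [Nat.sub_self, List.getD_cons_zero, hgd]
    · have hgd : ws1.getD j 0 = ws.getD j 0 := by
        rw [hws1]; split
        · exact getD_set_ne (fun he => hjk he.symm)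
        · rfl
      rw [hgd]
      by_cases hin : k ≤ j ∧ j < k + (es.length + 1)
      · have hcons : (e :: es).getD (j - k) "" = es.getD (j - (k + 1)) "" := by
          have h1 : j - k = (j - (k + 1)) + 1 := by omega
          rw [h1, List.getD_cons_succ]
        rw [if_pos hin, if_pos (show k + 1 ≤ j ∧ j < k + 1 + es.length by omega), hcons]
      · rw [if_neg hin, if_neg (show ¬(k + 1 ≤ j ∧ j < k + 1 + es.length) by omega)]

theorem widthsOf_length (rows : List (List String)) (n : Nat) : (widthsOf rows n).length = n := by
  simp [widthsOf]

theorem getD_widthsOf (rows : List (List String)) (n j : Nat) :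
    (widthsOf rows n).getD j 0 = if j < n then wcol rows j else 0 := by
  by_cases h : j < n
  · rw [if_pos h, List.getD_eq_getElem _ _ (by simpa [widthsOf] using h)]
    simp [widthsOf]
  · rw [if_neg h, List.getD_eq_default _ _ (by simpa [widthsOf] using Nat.le_of_not_lt h)]

theorem le_wcol (rows : List (List String)) (j : Nat) (r : List String) (hr : r ∈ rows) :
    (r.getD j "").toList.length ≤ wcol rows j := by
  unfold wcol
  rw [show rows.foldl (fun (m : Nat) rr => max m (rr.getD j "").toList.length) 0
      = List.foldl max 0 (rows.map (fun rr => (rr.getD j "").toList.length)) from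
    (List.foldl_map).symm]
  exact (PySem.List.le_foldl_max _ _).2 _ (List.mem_map_of_mem hr)

theorem wcol_append_singleton (rows : List (List String)) (r : List String) (j : Nat) :
    wcol (rows ++ [r]) j = max (wcol rows j) (r.getD j "").toList.length := by
  unfold wcol
  rw [List.foldl_append]
  rfl

-- B's running widths after a row are the per-column maxes including that row
theorem updW_eq (done : List (List String)) (row : List String) (n : Nat) (hrow : row.length = n) :
    updW (widthsOf done n) 0 row = widthsOf (done ++ [row]) n := by
  apply List.ext_getElem
  · rw [updW_length, widthsOf_length, widthsOf_length]
  · intro i h1 h2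
    have hi : i < n := by simpa [widthsOf] using h2
    rw [← List.getD_eq_getElem _ 0 h1, ← List.getD_eq_getElem _ 0 h2]
    rw [updW_getD row (widthsOf done n) 0 i (by rw [widthsOf_length]; omega)]
    rw [if_pos (by constructor <;> omega)]
    rw [getD_widthsOf, getD_widthsOf, if_pos hi, if_pos hi, wcol_append_singleton]
    simp

-- every done row is bounded columnwise by its widths vector
theorem bound_done (done : List (List String)) (n : Nat) (hd : ∀ r ∈ done, r.length = n) :
    ∀ r ∈ done, ∀ j, 0 ≤ j → (r.getD j "").toList.length ≤ (widthsOf done n).getD j 0 := by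
  intro r hr j _
  rw [getD_widthsOf]
  by_cases h : j < n
  · rw [if_pos h]; exact le_wcol done j r hr
  · rw [if_neg h]
    rw [List.getD_eq_default _ _ (by rw [hd r hr]; omega)]
    simp

-- B's outer loop: the invariant state after the done rows
theorem outerB (n : Nat) : ∀ (rows done : List (List String)),
    (∀ r ∈ rows, r.length = n) → (∀ r ∈ done, r.length = n) →
    rows.foldl (fun st row =>
      let st2 := (PySem.List.enumerate row).foldl growStep st
      (st2.1, st2.2 ++ [(PySem.List.enumerate row).map (fun p =>
          String.ofList (p.2.toList ++ List.replicate (st2.1.getD p.1.toNat 0 - p.2.toList.length) ' '))]))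
      (widthsOf done n, done.map (fun r => padRow (widthsOf done n) 0 r))
    = (widthsOf (done ++ rows) n, (done ++ rows).map (fun r => padRow (widthsOf (done ++ rows) n) 0 r)) := by
  intro rows
  induction rows with
  | nil => intro done _ _; simp
  | cons r rs ih =>
    intro done hrows hdone
    simp only [List.foldl_cons]
    have h0 : (0 : Int) = ((0 : Nat) : Int) := rfl
    have hinner := innerB r 0 (widthsOf done n) done
      (by rw [widthsOf_length]; have := hrows r (by simp); omega)
      (bound_done done n hdone)
    rw [show PySem.List.enumerate r = PySem.List.enumerate r ((0 : Nat) : Int) from rfl]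
    rw [hinner, updW_eq done r n (hrows r (by simp))]
    have hnew := map_enumerate_pad (widthsOf (done ++ [r]) n) r 0
    simp only [padStr] at hnew
    rw [hnew]
    have hmap : done.map (fun rr => padRow (widthsOf (done ++ [r]) n) 0 rr) ++ [padRow (widthsOf (done ++ [r]) n) 0 r]
        = (done ++ [r]).map (fun rr => padRow (widthsOf (done ++ [r]) n) 0 rr) := by
      simp
    rw [hmap]
    rw [ih (done ++ [r]) (fun x hx => hrows x (by simp [hx]))
        (by intro x hx; rcases List.mem_append.mp hx with h | h
            · exact hdone x h
            · simp at h; subst h; exact hrows x (by simp))]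
    simp

theorem pyMaxNat_eq_foldl (l : List Nat) (h : l ≠ []) : pyMaxNat l = l.foldl max 0 := by
  match l with
  | h0 :: t =>
    simp only [pyMaxNat, List.foldl_cons]
    rw [Nat.zero_max]

-- A's column maxes are B's final widths
theorem maxes_eq (tl : List (List String)) (n : Nat) (h : tl ≠ []) :
    (colsLen tl n).map pyMaxNat = widthsOf tl n := by
  unfold colsLen widthsOf
  rw [List.map_map]
  apply List.map_congr_left
  intro i _
  simp only [Function.comp_apply]
  rw [pyMaxNat_eq_foldl _ (by simpa using h)]
  unfold wcol
  rw [show tl.foldl (fun (m : Nat) rr => max m (rr.getD i "").toList.length) 0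
      = List.foldl max 0 (tl.map (fun rr => (rr.getD i "").toList.length)) from
    (List.foldl_map).symm]

-- ===== VERDICT (by name: the statement is the Claim_ definition above) =====
theorem fill_rows_spec : Claim_equal_fill_rows := by
  intro tl _ hpre
  unfold Spec_fill_rows fill_rows fill_rows_alt
  simp only []
  set n := (tl.headD []).length with hn
  -- A side: widths
  have hinit : (List.replicate n ([] : List Nat)) = colsLen [] n := by
    simp [colsLen, List.map_const']
  rw [hinit, foldA_cols n tl [] hpre.2]
  simp only [List.nil_append]
  rw [maxes_eq tl n hpre.1]
  -- B side: the outer loop from the empty state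
  have hinit2 : (List.replicate n (0 : Nat)) = widthsOf [] n := by
    apply List.ext_getElem
    · simp [widthsOf]
    · intro i h1 h2
      simp [widthsOf, wcol]
  rw [hinit2]
  have houter := outerB n tl [] hpre.2 (by intro r hr; simp at hr)
  simp only [List.map_nil, List.nil_append] at houter
  rw [houter]
  -- A's padding pass equals padRow with those widths
  apply List.map_congr_left
  intro row _
  have h1 := foldA_pad (fun i e => if 0 < (((widthsOf tl n).getD i 0 : Int) - (e.toList.length : Int))
        then String.ofList (e.toList ++ List.replicate (((widthsOf tl n).getD i 0 : Int) - (e.toList.length : Int)).toNat ' ')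
        else e) row ([] : List String)
  simp only [List.nil_append, List.length_nil, Nat.cast_zero] at h1
  rw [show PySem.List.enumerate row = PySem.List.enumerate row 0 from rfl, h1]
  rw [show ((0 : Int) = ((0 : Nat) : Int)) from rfl, ← map_enumerate_pad (widthsOf tl n) row 0]
  apply List.map_congr_left
  intro p _
  exact padA_eq_padStr ((widthsOf tl n).getD p.1.toNat 0) p.2
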